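-- pv_equiv track=rewrite | github.com/m1guelperez/jupylab_ext | notebook_labeling/nlp/utils.py | rename_magic_commands
-- ===== SOURCE A (Python) =====
-- def rename_magic_commands(text_as_list: list) -> list:
--     """Removes all magic commands from the notebook. If the cell contains a magic command and was not labeled as SETUP, it will be labeled as SETUP"""
--     setup_cell = False
--     for line in text_as_list:
--         if "SETUP" in line:
--             setup_cell = True
--             break
--     temp = []
--     for line in text_as_list:
--         if (
--             str(line).strip().startswith("%") or str(line).strip().startswith("!")
--         ) and setup_cell:
--             continue
--         elif (
--             str(line).strip().startswith("%") or str(line).strip().startswith("!")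
--         ) and not setup_cell:
--             temp.insert(0, "SETUP")
--         else:
--             temp.append(line)
--     return temp
-- ===== SOURCE B (Python) =====
-- def rename_magic_commands(text_as_list: list) -> list:
--     """Removes all magic commands from the notebook. If the cell contains a magic
--     command and was not labeled as SETUP, it will be labeled as SETUP."""
--     setup_cell = any("SETUP" in line for line in text_as_list)
--     kept = [line for line in text_as_list
--             if not (str(line).strip().startswith("%") or str(line).strip().startswith("!"))]
--     if not setup_cell and len(kept) < len(text_as_list):
--         return ["SETUP"] + kept
--     return kept
-- ===== Notes on version B (the rewrite author's own statement) =====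
-- stated objective: simpler
-- what changed: Replaces A's single accumulator loop that threads insert(0)/append through paired branches with staged declarative passes (any() detection, a filter comprehension, a length comparison to detect magic lines) and labels an unlabeled magic cell with exactly ONE 'SETUP' marker instead of one per magic line.
-- intended difference: On cells with no 'SETUP' label and two or more magic-command lines, A prepends one 'SETUP' marker per magic line (an artefact of calling insert(0,'SETUP') inside the loop), while B prepends a single 'SETUP'; the docstring says the cell 'will be labeled as SETUP', i.e. labeled once, so B's single label is the intended value. — e.g. on rename_magic_commands(["%a", "!b"]): A returns ["SETUP", "SETUP"], B returns ["SETUP"]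
import Mathlib
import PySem

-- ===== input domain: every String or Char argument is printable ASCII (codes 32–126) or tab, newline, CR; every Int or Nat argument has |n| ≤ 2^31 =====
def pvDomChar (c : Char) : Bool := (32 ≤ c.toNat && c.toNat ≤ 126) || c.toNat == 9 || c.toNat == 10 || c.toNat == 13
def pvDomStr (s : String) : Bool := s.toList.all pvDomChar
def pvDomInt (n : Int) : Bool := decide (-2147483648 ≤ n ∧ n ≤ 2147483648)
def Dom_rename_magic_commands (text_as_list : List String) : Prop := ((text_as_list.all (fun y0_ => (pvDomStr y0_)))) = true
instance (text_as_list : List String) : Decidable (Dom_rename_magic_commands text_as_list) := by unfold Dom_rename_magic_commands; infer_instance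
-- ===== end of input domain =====

-- B replaces A's single insert(0)/append accumulator loop with staged passes (any / filter /
-- length comparison) and labels an unlabeled magic cell with exactly one "SETUP" marker.

-- ===== PORT A =====
-- first loop of A: scan for "SETUP" with early break
def setupScanA : List String → Bool
  | [] => false
  | line :: rest => if PySem.Str.isIn "SETUP" line then true else setupScanA rest

def rename_magic_commands (text_as_list : List String) : List String :=
  let setup_cell := setupScanA text_as_list
  text_as_list.foldl
    (fun temp line =>
      if (PySem.Str.startswith (PySem.Str.strip line) "%"
            || PySem.Str.startswith (PySem.Str.strip line) "!") && setup_cell then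
        temp
      else if (PySem.Str.startswith (PySem.Str.strip line) "%"
            || PySem.Str.startswith (PySem.Str.strip line) "!") && !setup_cell then
        "SETUP" :: temp            -- temp.insert(0, "SETUP")
      else
        temp ++ [line])            -- temp.append(line)
    []

-- ===== PORT B =====
def isMagicB (line : String) : Bool :=
  PySem.Str.startswith (PySem.Str.strip line) "%"
    || PySem.Str.startswith (PySem.Str.strip line) "!"

def rename_magic_commands_alt (text_as_list : List String) : List String :=
  let setup_cell := text_as_list.any (fun line => PySem.Str.isIn "SETUP" line)
  let kept := text_as_list.filter (fun line => !isMagicB line)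
  if !setup_cell && decide (kept.length < text_as_list.length) then "SETUP" :: kept
  else kept

-- ===== PRECONDITION & SPEC =====
-- On cells with no "SETUP" label and two or more magic lines, A prepends one "SETUP" per magic
-- line (an artefact of insert(0,"SETUP") inside the loop); B prepends a single "SETUP", which is
-- the intended single labeling of the cell.
-- closed-form magic-line test on the raw input: the first non-whitespace character is '%' or '!'
def magicHead (line : String) : Bool :=
  match line.toList.dropWhile PySem.Chars.isspace with
  | [] => false
  | c :: _ => c == '%' || c == '!'

def D_rename_magic_commands (text_as_list : List String) : Prop :=
  (∀ line ∈ text_as_list, ¬ ("SETUP".toList <:+: line.toList)) ∧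
  2 ≤ text_as_list.countP magicHead
instance (text_as_list : List String) : Decidable (D_rename_magic_commands text_as_list) := by
  unfold D_rename_magic_commands; infer_instance

def Spec_rename_magic_commands (text_as_list : List String) (out : List String) : Prop :=
  ¬ D_rename_magic_commands text_as_list → out = rename_magic_commands_alt text_as_list
instance (text_as_list : List String) (out : List String) : Decidable (Spec_rename_magic_commands text_as_list out) := by unfold Spec_rename_magic_commands; infer_instance

def pvDiffWitness_rename_magic_commands : List String := ["%a", "!b"]
def pvDiffWitnessOut_rename_magic_commands : (List String) × (List String) :=
  (["SETUP", "SETUP"], ["SETUP"])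

-- ===== CLAIM (what is proved, stated in full; the proofs are below) =====
def Claim_unchanged_rename_magic_commands : Prop := ∀ (text_as_list : List String), Dom_rename_magic_commands text_as_list → Spec_rename_magic_commands text_as_list (rename_magic_commands text_as_list)
def Claim_changed_rename_magic_commands : Prop := Dom_rename_magic_commands (pvDiffWitness_rename_magic_commands) ∧ D_rename_magic_commands (pvDiffWitness_rename_magic_commands) ∧ rename_magic_commands (pvDiffWitness_rename_magic_commands) = pvDiffWitnessOut_rename_magic_commands.1 ∧ rename_magic_commands_alt (pvDiffWitness_rename_magic_commands) = pvDiffWitnessOut_rename_magic_commands.2 ∧ pvDiffWitnessOut_rename_magic_commands.1 ≠ pvDiffWitnessOut_rename_magic_commands.2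
def Claim_exact_rename_magic_commands : Prop := ∀ (text_as_list : List String), Dom_rename_magic_commands text_as_list → D_rename_magic_commands text_as_list → rename_magic_commands text_as_list ≠ rename_magic_commands_alt text_as_list

-- ===== LEMMAS AND PROOFS =====

theorem setupScanA_eq_any (xs : List String) :
    setupScanA xs = xs.any (fun line => PySem.Str.isIn "SETUP" line) := by
  induction xs with
  | nil => rfl
  | cons x xs ih =>
    simp only [setupScanA, List.any_cons]
    by_cases h : PySem.Str.isIn "SETUP" x = true <;> simp [ih]

theorem foldA_true (xs : List String) (acc : List String) :
    xs.foldl (fun temp line =>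
      if isMagicB line && true then temp
      else if isMagicB line && !true then "SETUP" :: temp
      else temp ++ [line]) acc
    = acc ++ xs.filter (fun line => !isMagicB line) := by
  induction xs generalizing acc with
  | nil => simp
  | cons x xs ih =>
    rw [List.foldl_cons, ih]
    by_cases h : isMagicB x = true <;> simp [h]

theorem foldA_false (xs : List String) (acc : List String) :
    xs.foldl (fun temp line =>
      if isMagicB line && false then temp
      else if isMagicB line && !false then "SETUP" :: temp
      else temp ++ [line]) acc
    = List.replicate (xs.countP isMagicB) "SETUP" ++ acc
        ++ xs.filter (fun line => !isMagicB line) := by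
  induction xs generalizing acc with
  | nil => simp
  | cons x xs ih =>
    rw [List.foldl_cons, ih]
    by_cases h : isMagicB x = true
    · simp [h, List.replicate_succ', List.append_assoc]
    · simp [h, List.append_assoc]

theorem rstrip_cons_of_not_space (c : Char) (rest : List Char)
    (h : PySem.Chars.isspace c = false) :
    PySem.Chars.rstrip (c :: rest) = c :: PySem.Chars.rstrip rest := by
  simp only [PySem.Chars.rstrip, List.reverse_cons, List.dropWhile_append]
  by_cases he : (List.dropWhile PySem.Chars.isspace rest.reverse).isEmpty = true
  · simp_all [List.dropWhile, List.isEmpty_iff]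
  · simp_all

theorem isMagicB_eq_magicHead (line : String) :
    isMagicB line = magicHead line := by
  unfold isMagicB magicHead
  simp only [PySem.Str.startswith_eq, PySem.Str.toList_strip]
  rcases hdw : line.toList.dropWhile PySem.Chars.isspace with _ | ⟨c, rest⟩
  · simp [PySem.Chars.strip, PySem.Chars.lstrip, PySem.Chars.rstrip, hdw,
      PySem.Chars.startswith]
  · have hc : PySem.Chars.isspace c = false := by
      have hne : List.dropWhile PySem.Chars.isspace line.toList ≠ [] := by
        simp [hdw]
      have := List.head_dropWhile_not PySem.Chars.isspace hne
      simp_all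
    simp only [PySem.Chars.strip, PySem.Chars.lstrip, hdw,
      rstrip_cons_of_not_space c rest hc, PySem.Chars.startswith]
    have h1 : "%".toList = ['%'] := rfl
    have h2 : "!".toList = ['!'] := rfl
    rw [h1, h2]
    by_cases e1 : c = '%' <;> by_cases e2 : c = '!' <;>
      simp [e1, e2, List.isPrefixOf, BEq.comm]

theorem countP_magic_eq (xs : List String) :
    xs.countP magicHead = xs.countP isMagicB :=
  List.countP_congr (fun a _ => by rw [isMagicB_eq_magicHead])

theorem any_setup_false_iff (xs : List String) :
    (xs.any fun line => PySem.Str.isIn "SETUP" line) = false ↔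
      ∀ line ∈ xs, ¬ ("SETUP".toList <:+: line.toList) := by
  simp [List.any_eq_false, PySem.Chars.isIn_eq_false_iff]

theorem countP_add_filter_not (xs : List String) :
    xs.countP isMagicB + (xs.filter (fun l => !isMagicB l)).length = xs.length := by
  induction xs with
  | nil => rfl
  | cons x xs ih =>
    by_cases h : isMagicB x = true <;>
      simp [h] <;> omega

-- A's result when no line contains "SETUP": replicate (count of magic lines) ++ kept
theorem renameA_no_setup (xs : List String)
    (h : xs.any (fun line => PySem.Str.isIn "SETUP" line) = false) :
    rename_magic_commands xs
      = List.replicate (xs.countP isMagicB) "SETUP"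
          ++ xs.filter (fun line => !isMagicB line) := by
  unfold rename_magic_commands
  rw [setupScanA_eq_any, h]
  have := foldA_false xs []
  simpa [isMagicB] using this

theorem rename_magic_commands_spec : Claim_unchanged_rename_magic_commands := by
  intro xs _ hnd
  unfold rename_magic_commands_alt
  by_cases h : xs.any (fun line => PySem.Str.isIn "SETUP" line) = true
  · simp only [h, Bool.not_true, Bool.false_and]
    unfold rename_magic_commands
    rw [setupScanA_eq_any, h]
    have := foldA_true xs []
    simpa [isMagicB] using this
  · simp only [Bool.not_eq_true] at h
    rw [renameA_no_setup xs h]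
    have hc : xs.countP isMagicB ≤ 1 := by
      by_contra hc
      refine hnd ⟨(any_setup_false_iff xs).mp h, ?_⟩
      rw [countP_magic_eq]; omega
    have hlen := countP_add_filter_not xs
    simp only [h, Bool.not_false, Bool.true_and]
    interval_cases hcv : xs.countP isMagicB
    · have : (xs.filter (fun l => !isMagicB l)).length = xs.length := by omega
      simp [this]
    · have : (xs.filter (fun l => !isMagicB l)).length < xs.length := by omega
      simp [this, List.replicate_succ]

theorem rename_magic_commands_changed : Claim_changed_rename_magic_commands := by
  unfold Claim_changed_rename_magic_commands; decide

theorem rename_magic_commands_tight : Claim_exact_rename_magic_commands := by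
  intro xs _ hd heq
  obtain ⟨hall, hc'⟩ := hd
  have hc : 2 ≤ xs.countP isMagicB := by rw [← countP_magic_eq]; exact hc'
  have h : xs.any (fun line => PySem.Str.isIn "SETUP" line) = false :=
    (any_setup_false_iff xs).mpr hall
  have hA := renameA_no_setup xs h
  have hlen := countP_add_filter_not xs
  have hklt : (xs.filter (fun l => !isMagicB l)).length < xs.length := by omega
  have hB : rename_magic_commands_alt xs
      = "SETUP" :: xs.filter (fun l => !isMagicB l) := by
    unfold rename_magic_commands_alt
    rw [h]
    simp [hklt]
  rw [hA, hB] at heq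
  have := congrArg List.length heq
  simp [List.length_replicate] at this
  omega
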